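-- pv_equiv track=rewrite | github.com/curlie-may/Legal_Logic_Analyzer | contract_rag_foundation.py | _classify_argument_type
-- ===== SOURCE A (Python) =====
-- def _classify_argument_type(section_text: str) -> str:
--     """Determine contract argument type from content"""
--
--     text_lower = section_text.lower()
--
--     # Check for formation arguments
--     formation_indicators = ['offer', 'acceptance', 'consideration', 'mutual assent', 'formation']
--     if any(indicator in text_lower for indicator in formation_indicators):
--         return 'formation'
--
--     # Check for breach arguments
--     breach_indicators = ['breach', 'performance', 'material breach', 'substantial performance']
--     if any(indicator in text_lower for indicator in breach_indicators):
--         return 'breach'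
--
--     # Check for damages arguments
--     damages_indicators = ['damages', 'consequential', 'incidental', 'expectation', 'lost profits']
--     if any(indicator in text_lower for indicator in damages_indicators):
--         return 'damages'
--
--     # Check for defenses
--     defense_indicators = ['unconscionable', 'statute of limitations', 'parol evidence', 'impossibility']
--     if any(indicator in text_lower for indicator in defense_indicators):
--         return 'defenses'
--
--     # Check for interpretation issues
--     interpretation_indicators = ['interpretation', 'ambiguous', 'plain meaning', 'extrinsic evidence']
--     if any(indicator in text_lower for indicator in interpretation_indicators):
--         return 'interpretation'
--
--     return 'general'
-- ===== SOURCE B (Python) =====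
-- # Inverted index: each indicator maps to the priority rank of its category.
-- # Classification = label of the minimum priority among all matching indicators.
-- _INDICATOR_PRIORITY = {
--     'offer': 0, 'acceptance': 0, 'consideration': 0, 'mutual assent': 0, 'formation': 0,
--     'breach': 1, 'performance': 1, 'material breach': 1, 'substantial performance': 1,
--     'damages': 2, 'consequential': 2, 'incidental': 2, 'expectation': 2, 'lost profits': 2,
--     'unconscionable': 3, 'statute of limitations': 3, 'parol evidence': 3, 'impossibility': 3,
--     'interpretation': 4, 'ambiguous': 4, 'plain meaning': 4, 'extrinsic evidence': 4,
-- }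
-- _LABELS = ['formation', 'breach', 'damages', 'defenses', 'interpretation']
--
-- def _classify_argument_type(section_text: str) -> str:
--     text_lower = section_text.lower()
--     best = min((prio for ind, prio in _INDICATOR_PRIORITY.items() if ind in text_lower),
--                default=None)
--     return 'general' if best is None else _LABELS[best]
-- ===== Notes on version B (the rewrite author's own statement) =====
-- stated objective: alternative
-- what changed: Inverts the data: a flat indicator-to-priority map is scanned once, the minimum priority among all matching indicators (no per-category short-circuit) selects the label, replacing A's five ordered any()-branches.
import Mathlib
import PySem

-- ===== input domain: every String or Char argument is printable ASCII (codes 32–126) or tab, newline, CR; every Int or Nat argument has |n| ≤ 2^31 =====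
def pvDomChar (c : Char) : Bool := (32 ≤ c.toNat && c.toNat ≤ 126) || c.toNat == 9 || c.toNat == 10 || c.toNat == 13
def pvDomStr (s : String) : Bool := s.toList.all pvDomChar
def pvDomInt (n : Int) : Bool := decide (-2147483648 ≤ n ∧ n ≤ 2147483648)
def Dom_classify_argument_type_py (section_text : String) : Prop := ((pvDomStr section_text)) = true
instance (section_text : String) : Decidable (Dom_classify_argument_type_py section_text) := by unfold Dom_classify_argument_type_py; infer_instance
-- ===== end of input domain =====

-- B inverts the data: a flat indicator→priority map scanned once, minimum matching priority picks the label (alternative; same cost).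

-- ===== PORT A =====
def classify_argument_type_py (section_text : String) : String :=
  let text_lower := PySem.Str.lower section_text
  if ["offer", "acceptance", "consideration", "mutual assent", "formation"].any
      (fun indicator => PySem.Str.isIn indicator text_lower) then "formation"
  else if ["breach", "performance", "material breach", "substantial performance"].any
      (fun indicator => PySem.Str.isIn indicator text_lower) then "breach"
  else if ["damages", "consequential", "incidental", "expectation", "lost profits"].any
      (fun indicator => PySem.Str.isIn indicator text_lower) then "damages"
  else if ["unconscionable", "statute of limitations", "parol evidence", "impossibility"].any
      (fun indicator => PySem.Str.isIn indicator text_lower) then "defenses"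
  else if ["interpretation", "ambiguous", "plain meaning", "extrinsic evidence"].any
      (fun indicator => PySem.Str.isIn indicator text_lower) then "interpretation"
  else "general"

-- ===== PORT B =====
-- _INDICATOR_PRIORITY of Source B, in insertion order
def pvIndicatorPriority : List (String × Nat) :=
  [("offer", 0), ("acceptance", 0), ("consideration", 0), ("mutual assent", 0), ("formation", 0),
   ("breach", 1), ("performance", 1), ("material breach", 1), ("substantial performance", 1),
   ("damages", 2), ("consequential", 2), ("incidental", 2), ("expectation", 2), ("lost profits", 2),
   ("unconscionable", 3), ("statute of limitations", 3), ("parol evidence", 3), ("impossibility", 3),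
   ("interpretation", 4), ("ambiguous", 4), ("plain meaning", 4), ("extrinsic evidence", 4)]

def pvLabels : List String := ["formation", "breach", "damages", "defenses", "interpretation"]

def classify_argument_type_py_alt (section_text : String) : String :=
  let text_lower := PySem.Str.lower section_text
  let best := PySem.List.min?
    ((pvIndicatorPriority.filter (fun pr => PySem.Str.isIn pr.1 text_lower)).map Prod.snd)
    (fun x => x)
  match best with
  | none => "general"
  -- _LABELS[best]: best is always a priority 0–4 of the table, so in range; the getD default is never used
  | some k => (PySem.List.pyGet? pvLabels (k : Int)).getD "general"

-- ===== PRECONDITION & SPEC =====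
def Spec_classify_argument_type_py (section_text : String) (out : String) : Prop := out = classify_argument_type_py_alt section_text
instance (section_text : String) (out : String) : Decidable (Spec_classify_argument_type_py section_text out) := by unfold Spec_classify_argument_type_py; infer_instance

-- ===== CLAIM (what is proved, stated in full; the proofs are below) =====
def Claim_equal_classify_argument_type_py : Prop := ∀ (section_text : String), Dom_classify_argument_type_py section_text → Spec_classify_argument_type_py section_text (classify_argument_type_py section_text)

-- ===== LEMMAS AND PROOFS =====

theorem pv_min_eq (prios : List Nat) (k : Nat)
    (hk : k ∈ prios) (hlt : ∀ m ∈ prios, k ≤ m) :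
    PySem.List.min? prios (fun x => x) = some k := by
  cases hmin : PySem.List.min? prios (fun x => x) with
  | none => exact absurd ((PySem.List.min?_eq_none_iff prios _).mp hmin ▸ hk) (List.not_mem_nil)
  | some m =>
    have h1 : m ≤ k := PySem.List.min?_isMin hmin k hk
    have h2 : k ≤ m := hlt m (PySem.List.min?_mem hmin)
    exact congrArg some (Nat.le_antisymm h1 h2)

-- the core: A's if-chain agrees with B's min-of-matching-priorities on any lowered text
theorem pv_key (tl : String) :
    (if (["offer", "acceptance", "consideration", "mutual assent", "formation"].any
        (fun indicator => PySem.Str.isIn indicator tl)) = true then "formation"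
    else if (["breach", "performance", "material breach", "substantial performance"].any
        (fun indicator => PySem.Str.isIn indicator tl)) = true then "breach"
    else if (["damages", "consequential", "incidental", "expectation", "lost profits"].any
        (fun indicator => PySem.Str.isIn indicator tl)) = true then "damages"
    else if (["unconscionable", "statute of limitations", "parol evidence", "impossibility"].any
        (fun indicator => PySem.Str.isIn indicator tl)) = true then "defenses"
    else if (["interpretation", "ambiguous", "plain meaning", "extrinsic evidence"].any
        (fun indicator => PySem.Str.isIn indicator tl)) = true then "interpretation"
    else "general")
    = (match PySem.List.min?
        ((pvIndicatorPriority.filter (fun pr => PySem.Str.isIn pr.1 tl)).map Prod.snd)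
        (fun x => x) with
      | none => "general"
      | some k => (PySem.List.pyGet? pvLabels (k : Int)).getD "general") := by
  set prios := ((pvIndicatorPriority.filter (fun pr => PySem.Str.isIn pr.1 tl)).map Prod.snd) with hpr
  have hbound : ∀ m ∈ prios, m ≤ 4 := by
    intro m hm
    rw [hpr] at hm
    simp [pvIndicatorPriority, List.mem_map, List.mem_filter] at hm
    omega
  have hm0 : (0 ∈ prios) ↔ (["offer", "acceptance", "consideration", "mutual assent", "formation"].any
      (fun indicator => PySem.Str.isIn indicator tl) = true) := by
    simp [hpr, pvIndicatorPriority, List.mem_map, List.mem_filter]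
  have hm1 : (1 ∈ prios) ↔ (["breach", "performance", "material breach", "substantial performance"].any
      (fun indicator => PySem.Str.isIn indicator tl) = true) := by
    simp [hpr, pvIndicatorPriority, List.mem_map, List.mem_filter]
  have hm2 : (2 ∈ prios) ↔ (["damages", "consequential", "incidental", "expectation", "lost profits"].any
      (fun indicator => PySem.Str.isIn indicator tl) = true) := by
    simp [hpr, pvIndicatorPriority, List.mem_map, List.mem_filter]
  have hm3 : (3 ∈ prios) ↔ (["unconscionable", "statute of limitations", "parol evidence", "impossibility"].any
      (fun indicator => PySem.Str.isIn indicator tl) = true) := by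
    simp [hpr, pvIndicatorPriority, List.mem_map, List.mem_filter]
  have hm4 : (4 ∈ prios) ↔ (["interpretation", "ambiguous", "plain meaning", "extrinsic evidence"].any
      (fun indicator => PySem.Str.isIn indicator tl) = true) := by
    simp [hpr, pvIndicatorPriority, List.mem_map, List.mem_filter]
  by_cases h1 : (["offer", "acceptance", "consideration", "mutual assent", "formation"].any
      (fun indicator => PySem.Str.isIn indicator tl) = true)
  · have : PySem.List.min? prios (fun x => x) = some 0 :=
      pv_min_eq prios 0 (hm0.mpr h1) (fun m _ => Nat.zero_le m)
    rw [this, if_pos h1]; decide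
  · by_cases h2 : (["breach", "performance", "material breach", "substantial performance"].any
        (fun indicator => PySem.Str.isIn indicator tl) = true)
    · have : PySem.List.min? prios (fun x => x) = some 1 := by
        refine pv_min_eq prios 1 (hm1.mpr h2) (fun m hm => ?_)
        have h0 : m ≠ 0 := fun e => h1 (hm0.mp (e ▸ hm))
        omega
      rw [this, if_neg h1, if_pos h2]; decide
    · by_cases h3 : (["damages", "consequential", "incidental", "expectation", "lost profits"].any
          (fun indicator => PySem.Str.isIn indicator tl) = true)
      · have : PySem.List.min? prios (fun x => x) = some 2 := by
          refine pv_min_eq prios 2 (hm2.mpr h3) (fun m hm => ?_)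
          have e0 : m ≠ 0 := fun e => h1 (hm0.mp (e ▸ hm))
          have e1 : m ≠ 1 := fun e => h2 (hm1.mp (e ▸ hm))
          omega
        rw [this, if_neg h1, if_neg h2, if_pos h3]; decide
      · by_cases h4 : (["unconscionable", "statute of limitations", "parol evidence", "impossibility"].any
            (fun indicator => PySem.Str.isIn indicator tl) = true)
        · have : PySem.List.min? prios (fun x => x) = some 3 := by
            refine pv_min_eq prios 3 (hm3.mpr h4) (fun m hm => ?_)
            have e0 : m ≠ 0 := fun e => h1 (hm0.mp (e ▸ hm))
            have e1 : m ≠ 1 := fun e => h2 (hm1.mp (e ▸ hm))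
            have e2 : m ≠ 2 := fun e => h3 (hm2.mp (e ▸ hm))
            omega
          rw [this, if_neg h1, if_neg h2, if_neg h3, if_pos h4]; decide
        · by_cases h5 : (["interpretation", "ambiguous", "plain meaning", "extrinsic evidence"].any
              (fun indicator => PySem.Str.isIn indicator tl) = true)
          · have : PySem.List.min? prios (fun x => x) = some 4 := by
              refine pv_min_eq prios 4 (hm4.mpr h5) (fun m hm => ?_)
              have e0 : m ≠ 0 := fun e => h1 (hm0.mp (e ▸ hm))
              have e1 : m ≠ 1 := fun e => h2 (hm1.mp (e ▸ hm))
              have e2 : m ≠ 2 := fun e => h3 (hm2.mp (e ▸ hm))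
              have e3 : m ≠ 3 := fun e => h4 (hm3.mp (e ▸ hm))
              omega
            rw [this, if_neg h1, if_neg h2, if_neg h3, if_neg h4, if_pos h5]; decide
          · have hnil : prios = [] := by
              rw [List.eq_nil_iff_forall_not_mem]
              intro m hm
              have hb := hbound m hm
              have e0 : m ≠ 0 := fun e => h1 (hm0.mp (e ▸ hm))
              have e1 : m ≠ 1 := fun e => h2 (hm1.mp (e ▸ hm))
              have e2 : m ≠ 2 := fun e => h3 (hm2.mp (e ▸ hm))
              have e3 : m ≠ 3 := fun e => h4 (hm3.mp (e ▸ hm))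
              have e4 : m ≠ 4 := fun e => h5 (hm4.mp (e ▸ hm))
              omega
            have hmin : PySem.List.min? prios (fun x => x) = none :=
              (PySem.List.min?_eq_none_iff prios _).mpr hnil
            rw [hmin, if_neg h1, if_neg h2, if_neg h3, if_neg h4, if_neg h5]

-- ===== VERDICT (by name: the statement is the Claim_ definition above) =====
theorem classify_argument_type_py_spec : Claim_equal_classify_argument_type_py := by
  intro s _
  unfold Spec_classify_argument_type_py classify_argument_type_py classify_argument_type_py_alt
  exact pv_key (PySem.Str.lower s)
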